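-- pv_equiv track=rewrite | github.com/Kozea/WeasyPrint | weasyprint/html_utils.py | parse_html_integer
-- ===== SOURCE A (Python) =====
-- HTML_WHITESPACE = ' \t\n\f\r'
--
-- ASCII_DIGITS = frozenset('0123456789')
--
-- def parse_html_integer(string):
--     """Parse an integer from an HTML attribute value.
--
--     Follow the HTML specification rules for parsing integers:
--     https://html.spec.whatwg.org/#rules-for-parsing-integers
--
--     Return an integer, or ``None`` on error.
--
--     """
--     position = 0
--     length = len(string)
--
--     # Skip ASCII whitespace.
--     while position < length and string[position] in HTML_WHITESPACE:
--         position += 1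
--
--     if position >= length:
--         return None
--
--     # Determine sign.
--     sign = 1
--     if string[position] == '-':
--         sign = -1
--         position += 1
--     elif string[position] == '+':
--         position += 1
--
--     if position >= length or string[position] not in ASCII_DIGITS:
--         return None
--
--     # Collect sequence of ASCII digits.
--     digits_start = position
--     while position < length and string[position] in ASCII_DIGITS:
--         position += 1
--
--     return sign * int(string[digits_start:position])
-- ===== SOURCE B (Python) =====
-- HTML_WHITESPACE = ' \t\n\f\r'
-- ASCII_DIGITS = '0123456789'
--
-- def parse_html_integer(string):
--     """Parse an integer from an HTML attribute value (HTML spec rules)."""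
--     s = string.lstrip(HTML_WHITESPACE)
--     sign = 1
--     if s[:1] == '-':
--         sign, s = -1, s[1:]
--     elif s[:1] == '+':
--         s = s[1:]
--     n = len(s) - len(s.lstrip(ASCII_DIGITS))
--     if n == 0:
--         return None
--     return sign * int(s[:n])
-- ===== Notes on version B (the rewrite author's own statement) =====
-- stated objective: simpler
-- what changed: Replaces A's index-driven while-loops and manual position bookkeeping with a loop-free decomposition: lstrip for whitespace, an s[:1] prefix test for the sign, and an lstrip length difference to measure the digit run.
import Mathlib
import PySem

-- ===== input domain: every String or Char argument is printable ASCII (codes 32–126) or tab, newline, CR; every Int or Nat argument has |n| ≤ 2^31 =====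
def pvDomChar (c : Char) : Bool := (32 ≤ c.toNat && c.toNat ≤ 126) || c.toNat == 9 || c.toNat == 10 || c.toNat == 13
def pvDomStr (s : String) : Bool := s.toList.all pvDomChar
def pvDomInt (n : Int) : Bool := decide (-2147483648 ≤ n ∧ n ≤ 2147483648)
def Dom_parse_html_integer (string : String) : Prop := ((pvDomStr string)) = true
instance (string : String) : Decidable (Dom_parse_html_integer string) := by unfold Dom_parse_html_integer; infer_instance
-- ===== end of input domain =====

-- B replaces A's index-driven while-loops and manual position bookkeeping by a
-- loop-free string-method decomposition (lstrip for whitespace, a one-character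
-- prefix test for the sign, an lstrip length difference for the digit run);
-- objective: simpler/idiomatic, same behaviour.

-- ===== PORT A =====
-- HTML_WHITESPACE = ' \t\n\f\r'
def pvWS : List Char := [' ', '\t', '\n', '\x0c', '\r']
-- ASCII_DIGITS = frozenset('0123456789')
def pvDIG : List Char := ['0', '1', '2', '3', '4', '5', '6', '7', '8', '9']

def pvIsWS (c : Char) : Bool := c ∈ pvWS
def pvIsDG (c : Char) : Bool := c ∈ pvDIG

-- Python's builtin int() on a (non-empty) string of ASCII digits, as both sources call it.
def pvIntOf (cs : List Char) : Int :=
  cs.foldl (fun a c => a * 10 + ((c.toNat : Int) - 48)) 0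

-- while position < length and string[position] in HTML_WHITESPACE: position += 1
def pvSkipWS (cs : List Char) (pos : Nat) : Nat :=
  if pos < cs.length then
    if pvIsWS (cs.getD pos ' ') then pvSkipWS cs (pos + 1) else pos
  else pos
termination_by cs.length - pos

-- while position < length and string[position] in ASCII_DIGITS: position += 1
def pvSkipDG (cs : List Char) (pos : Nat) : Nat :=
  if pos < cs.length then
    if pvIsDG (cs.getD pos ' ') then pvSkipDG cs (pos + 1) else pos
  else pos
termination_by cs.length - pos

def parse_html_integer (string : String) : Option Int :=
  let cs := string.toList
  let length := cs.length
  -- Skip ASCII whitespace.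
  let position := pvSkipWS cs 0
  if position ≥ length then none
  else
    -- Determine sign.
    let sp : Int × Nat :=
      if cs.getD position ' ' = '-' then (-1, position + 1)
      else if cs.getD position ' ' = '+' then (1, position + 1)
      else (1, position)
    let sign := sp.1
    let position := sp.2
    if position ≥ length then none
    else if ¬ pvIsDG (cs.getD position ' ') then none
    else
      -- Collect sequence of ASCII digits.
      let digits_start := position
      let position := pvSkipDG cs position
      some (sign * pvIntOf ((cs.drop digits_start).take (position - digits_start)))

-- ===== PORT B =====
def parse_html_integer_alt (string : String) : Option Int :=
  -- s = string.lstrip(HTML_WHITESPACE)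
  let s := string.toList.dropWhile pvIsWS
  -- if s[:1] == '-': sign, s = -1, s[1:]  elif s[:1] == '+': s = s[1:]
  let sp : Int × List Char :=
    if s.take 1 = ['-'] then (-1, s.drop 1)
    else if s.take 1 = ['+'] then (1, s.drop 1)
    else (1, s)
  let sign := sp.1
  let s := sp.2
  -- n = len(s) - len(s.lstrip(ASCII_DIGITS))
  let n := s.length - (s.dropWhile pvIsDG).length
  if n = 0 then none
  else some (sign * pvIntOf (s.take n))

-- ===== PRECONDITION & SPEC =====
def Spec_parse_html_integer (string : String) (out : Option Int) : Prop := out = parse_html_integer_alt string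
instance (string : String) (out : Option Int) : Decidable (Spec_parse_html_integer string out) := by unfold Spec_parse_html_integer; infer_instance

-- ===== CLAIM (what is proved, stated in full; the proofs are below) =====
def Claim_equal_parse_html_integer : Prop := ∀ (string : String), Dom_parse_html_integer string → Spec_parse_html_integer string (parse_html_integer string)

-- ===== LEMMAS AND PROOFS =====

theorem drop_cons_facts (cs : List Char) (pos : Nat) (c : Char) (t : List Char)
    (h : cs.drop pos = c :: t) :
    cs.getD pos ' ' = c ∧ pos < cs.length ∧ cs.drop (pos + 1) = t := by
  have hlen : (List.drop pos cs).length = cs.length - pos := by simp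
  rw [h] at hlen
  have hpos : pos < cs.length := by simp at hlen; omega
  have h0 : cs[pos]? = some c := by
    have : (cs.drop pos)[0]? = some c := by rw [h]; rfl
    rwa [List.getElem?_drop, Nat.add_zero] at this
  refine ⟨by simp [List.getD_eq_getElem?_getD, h0], hpos, ?_⟩
  have h1 : List.drop 1 (cs.drop pos) = t := by rw [h]; rfl
  rwa [List.drop_drop] at h1

theorem pvSkipWS_eq (cs : List Char) (pos : Nat) :
    pvSkipWS cs pos = pos + ((cs.drop pos).takeWhile pvIsWS).length := by
  have H : ∀ n pos, cs.length - pos ≤ n →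
      pvSkipWS cs pos = pos + ((cs.drop pos).takeWhile pvIsWS).length := by
    intro n
    induction n with
    | zero =>
      intro pos hle
      rw [pvSkipWS, if_neg (by omega), List.drop_eq_nil_of_le (by omega)]
      simp
    | succ n ih =>
      intro pos hle
      rw [pvSkipWS]
      by_cases h : pos < cs.length
      · cases hcs : cs.drop pos with
        | nil =>
          have : (List.drop pos cs).length = cs.length - pos := by simp
          rw [hcs] at this; simp at this; omega
        | cons c t =>
          obtain ⟨hget, -, hdrop⟩ := drop_cons_facts cs pos c t hcs
          rw [if_pos h, hget]
          by_cases hw : pvIsWS c = true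
          · rw [if_pos hw, ih (pos + 1) (by omega), hdrop]
            simp [hw]
            omega
          · rw [if_neg hw]
            simp [hw]
      · rw [if_neg h, List.drop_eq_nil_of_le (by omega)]
        simp
  exact H (cs.length - pos) pos le_rfl

theorem pvSkipDG_eq (cs : List Char) (pos : Nat) :
    pvSkipDG cs pos = pos + ((cs.drop pos).takeWhile pvIsDG).length := by
  have H : ∀ n pos, cs.length - pos ≤ n →
      pvSkipDG cs pos = pos + ((cs.drop pos).takeWhile pvIsDG).length := by
    intro n
    induction n with
    | zero =>
      intro pos hle
      rw [pvSkipDG, if_neg (by omega), List.drop_eq_nil_of_le (by omega)]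
      simp
    | succ n ih =>
      intro pos hle
      rw [pvSkipDG]
      by_cases h : pos < cs.length
      · cases hcs : cs.drop pos with
        | nil =>
          have : (List.drop pos cs).length = cs.length - pos := by simp
          rw [hcs] at this; simp at this; omega
        | cons c t =>
          obtain ⟨hget, -, hdrop⟩ := drop_cons_facts cs pos c t hcs
          rw [if_pos h, hget]
          by_cases hw : pvIsDG c = true
          · rw [if_pos hw, ih (pos + 1) (by omega), hdrop]
            simp [hw]
            omega
          · rw [if_neg hw]
            simp [hw]
      · rw [if_neg h, List.drop_eq_nil_of_le (by omega)]
        simp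
  exact H (cs.length - pos) pos le_rfl

-- the digit-collecting tail of A equals the lstrip-difference tail of B
theorem tail_stage (cs : List Char) (pos : Nat) (sign : Int) :
    (if pos ≥ cs.length then none
     else if ¬ pvIsDG (cs.getD pos ' ') then none
     else some (sign * pvIntOf ((cs.drop pos).take (pvSkipDG cs pos - pos))))
    = (if (cs.drop pos).length - ((cs.drop pos).dropWhile pvIsDG).length = 0 then none
       else some (sign * pvIntOf ((cs.drop pos).take
         ((cs.drop pos).length - ((cs.drop pos).dropWhile pvIsDG).length)))) := by
  cases hcs : cs.drop pos with
  | nil =>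
    have : (List.drop pos cs).length = cs.length - pos := by simp
    rw [hcs] at this; simp at this
    rw [if_pos (by omega : pos ≥ cs.length)]
    simp
  | cons c t =>
    obtain ⟨hget, hpos, -⟩ := drop_cons_facts cs pos c t hcs
    have hlen : (c :: t).length
        = ((c :: t).takeWhile pvIsDG).length + ((c :: t).dropWhile pvIsDG).length := by
      conv_lhs => rw [← List.takeWhile_append_dropWhile (p := pvIsDG) (l := c :: t)]
      rw [List.length_append]
    rw [if_neg (by omega : ¬ pos ≥ cs.length), hget, pvSkipDG_eq, hcs]
    have htake : (c :: t).take ((c :: t).takeWhile pvIsDG).length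
        = (c :: t).takeWhile pvIsDG := by
      have := List.takeWhile_prefix (l := c :: t) (p := pvIsDG)
      exact (List.prefix_iff_eq_take.mp this).symm
    by_cases hd : pvIsDG c = true
    · have hne : ((c :: t).takeWhile pvIsDG).length ≠ 0 := by
        rw [List.takeWhile_cons, hd]; simp
      rw [if_neg (by simp [hd]), if_neg (by omega)]
      have : pos + ((c :: t).takeWhile pvIsDG).length - pos
          = ((c :: t).takeWhile pvIsDG).length := by omega
      rw [this, htake]
      have : (c :: t).length - ((c :: t).dropWhile pvIsDG).length
          = ((c :: t).takeWhile pvIsDG).length := by omega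
      rw [this, htake]
    · have hdw : (c :: t).dropWhile pvIsDG = c :: t := by
        rw [List.dropWhile_cons]; simp [hd]
      rw [if_pos (by simp [hd]), if_pos (by rw [hdw]; omega)]

-- ===== VERDICT (by name: the statement is the Claim_ definition above) =====
theorem parse_html_integer_spec : Claim_equal_parse_html_integer := by
  intro s _
  show parse_html_integer s = parse_html_integer_alt s
  unfold parse_html_integer parse_html_integer_alt
  simp only []
  set cs := s.toList with hcs
  rw [pvSkipWS_eq cs 0]
  simp only [List.drop_zero, Nat.zero_add]
  have hsplit : cs.drop (cs.takeWhile pvIsWS).length = cs.dropWhile pvIsWS := by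
    calc cs.drop (cs.takeWhile pvIsWS).length
        = (cs.takeWhile pvIsWS ++ cs.dropWhile pvIsWS).drop (cs.takeWhile pvIsWS).length := by
          rw [List.takeWhile_append_dropWhile]
      _ = cs.dropWhile pvIsWS := List.drop_left
  have hlen : cs.length = (cs.takeWhile pvIsWS).length + (cs.dropWhile pvIsWS).length := by
    conv_lhs => rw [← List.takeWhile_append_dropWhile (p := pvIsWS) (l := cs)]
    rw [List.length_append]
  cases hrest : cs.dropWhile pvIsWS with
  | nil =>
    rw [hrest] at hlen
    rw [if_pos (by simp at hlen; omega)]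
    simp
  | cons c t =>
    rw [hrest] at hlen hsplit
    obtain ⟨hget, hpos, hdrop1⟩ := drop_cons_facts cs _ c t hsplit
    rw [if_neg (by omega), hget]
    by_cases hm : c = '-'
    · subst hm
      rw [if_pos rfl]
      have ht := tail_stage cs ((cs.takeWhile pvIsWS).length + 1) (-1)
      simpa [hdrop1] using ht
    · by_cases hp : c = '+'
      · subst hp
        rw [if_neg (show ¬(('+' : Char) = '-') from by decide), if_pos rfl]
        have ht := tail_stage cs ((cs.takeWhile pvIsWS).length + 1) 1
        simpa [hdrop1] using ht
      · rw [if_neg hm, if_neg hp]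
        have ht := tail_stage cs ((cs.takeWhile pvIsWS).length) 1
        simpa [hsplit, hm, hp] using ht
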